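-- pv_equiv track=rewrite | github.com/askoufis/project-euler | problem24.py | permutationToFactoradic
-- ===== SOURCE A (Python) =====
-- def permutationToFactoradic(permutation, n):
--     """
--     Takes a permutation of the first n letters of the alphabet and returns the factoradic representation of that
--     permutation
--     Input: A permutation string and n an integer
--     Output: A string containing the factoradic representation of the permutation
--     """
--
--     # There's probably a faster way to do this than O(N^2)
--
--     factoradic = ""
--
--     c = 1
--
--     while c <= n:
--         for i in permutation:
--             counter = 0
--             for j in range(c, n):
--                 if i > permutation[j]:
--                     counter += 1
--
--             c += 1
--
--             factoradic += str(counter)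
--
--     return factoradic
-- ===== SOURCE B (Python) =====
-- def permutationToFactoradic(permutation, n):
--     if n <= 0:
--         return ""
--     cnt = [0] * 128
--     digits = []
--     i = len(permutation)
--     for ch in reversed(permutation):
--         i -= 1
--         code = ord(ch)
--         digits.append(str(sum(cnt[:code])))
--         if i < n:
--             cnt[code] += 1
--     digits.reverse()
--     return "".join(digits)
-- ===== Notes on version B (the rewrite author's own statement) =====
-- stated objective: faster
-- what changed: B replaces A's per-position inner scan over the remaining window by a single right-to-left pass that maintains a 128-entry ASCII histogram and reads each factoradic digit as a prefix sum of that histogram.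
import Mathlib
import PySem

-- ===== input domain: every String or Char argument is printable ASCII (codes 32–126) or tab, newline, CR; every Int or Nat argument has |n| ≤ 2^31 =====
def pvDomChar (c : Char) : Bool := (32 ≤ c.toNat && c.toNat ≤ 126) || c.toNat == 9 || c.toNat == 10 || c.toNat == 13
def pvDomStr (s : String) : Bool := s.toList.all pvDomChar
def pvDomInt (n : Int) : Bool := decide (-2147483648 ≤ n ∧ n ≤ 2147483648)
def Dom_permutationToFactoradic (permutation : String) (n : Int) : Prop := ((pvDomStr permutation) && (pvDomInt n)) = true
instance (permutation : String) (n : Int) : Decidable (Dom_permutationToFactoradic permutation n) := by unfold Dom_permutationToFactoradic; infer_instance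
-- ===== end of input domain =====

-- B replaces A's O(n^2) per-position inner scan by one right-to-left pass over a 128-entry
-- ASCII histogram, reading each factoradic digit as a prefix sum of the histogram (faster).

-- ===== PORT A =====
-- inner loop: 'counter = 0; for j in range(c, n): if i > permutation[j]: counter += 1'
-- (permutation[j] is PySem.List.pyGet?; none = IndexError, those inputs are outside Pre_)
def pvACount (perm : List Char) (ch : Char) (c n : Int) : Int :=
  (PySem.List.pyRange c n 1).foldl
    (fun counter j =>
      if (PySem.List.pyGet? perm j).any (fun cj => decide (cj < ch)) then counter + 1
      else counter) 0

-- one body of 'for i in permutation': counter, then 'c += 1', then 'factoradic += str(counter)'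
def pvAStep (perm : List Char) (n : Int) (st : Int × List Char) (ch : Char) : Int × List Char :=
  (st.1 + 1, st.2 ++ PySem.Int.toChars (pvACount perm ch st.1 n))

-- 'while c <= n: for i in permutation: …' — fuel only makes the loop total; on Pre_ the
-- while runs at most one pass (c jumps past n), so the fuel is never exhausted there.
def pvAWhile (perm : List Char) (n : Int) : Nat → Int × List Char → Int × List Char
  | 0, st => st
  | fuel + 1, st =>
      if st.1 ≤ n then pvAWhile perm n fuel (perm.foldl (pvAStep perm n) st) else st

def permutationToFactoradic (permutation : String) (n : Int) : String :=
  String.ofList (pvAWhile permutation.toList n (n.toNat + 1) (1, [])).2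

-- ===== PORT B =====
-- one body of 'for ch in reversed(permutation)': i -= 1; digits.append(str(sum(cnt[:code])));
-- if i < n: cnt[code] += 1   (state = (i, cnt, digits); cnt[:code] is take, code = ord(ch) ≥ 0)
def pvBStep (n : Int) (st : Int × List Int × List (List Char)) (ch : Char) :
    Int × List Int × List (List Char) :=
  let i := st.1 - 1
  let code := ch.toNat
  let digits := st.2.2 ++ [PySem.Int.toChars (st.2.1.take code).sum]
  let cnt := if i < n then st.2.1.set code (st.2.1.getD code 0 + 1) else st.2.1
  (i, cnt, digits)

def permutationToFactoradic_alt (permutation : String) (n : Int) : String :=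
  if n ≤ 0 then "" else
    let st := permutation.toList.reverse.foldl (pvBStep n)
      ((permutation.toList.length : Int), List.replicate 128 0, ([] : List (List Char)))
    String.ofList st.2.2.reverse.flatten

-- ===== PRECONDITION & SPEC =====
-- Pre_ is exactly where the Python A returns: for n > len(permutation) A raises IndexError
-- (nonempty permutation) or loops forever (empty permutation); no returning input is excluded.
def Pre_permutationToFactoradic (permutation : String) (n : Int) : Prop :=
  n ≤ (permutation.length : Int)
instance (permutation : String) (n : Int) : Decidable (Pre_permutationToFactoradic permutation n) := by
  unfold Pre_permutationToFactoradic; infer_instance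

def pvWitness_permutationToFactoradic : String × Int := ("ba", 2)

def Spec_permutationToFactoradic (permutation : String) (n : Int) (out : String) : Prop :=
  out = permutationToFactoradic_alt permutation n
instance (permutation : String) (n : Int) (out : String) : Decidable (Spec_permutationToFactoradic permutation n out) := by
  unfold Spec_permutationToFactoradic; infer_instance

-- ===== CLAIM (what is proved, stated in full; the proofs are below) =====
def Claim_equal_permutationToFactoradic : Prop := ∀ (permutation : String) (n : Int), Dom_permutationToFactoradic permutation n → Pre_permutationToFactoradic permutation n → Spec_permutationToFactoradic permutation n (permutationToFactoradic permutation n)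

-- ===== LEMMAS AND PROOFS =====

-- the common digit specification: digit k counts the j ∈ [k+1, n) with perm[j] < perm[k]
def pvDig (perm : List Char) (n : Int) (k : Nat) : List Char :=
  PySem.Int.toChars
    ((((perm.take n.toNat).drop (k + 1)).countP (fun w => decide (w < perm.getD k ' ')) : Nat) : Int)

-- the histogram B maintains, built from the right
def pvHist (ws : List Char) : List Int :=
  ws.foldr (fun w cnt => cnt.set w.toNat (cnt.getD w.toNat 0 + 1)) (List.replicate 128 0)

theorem pv_char_lt (a b : Char) : a < b ↔ a.toNat < b.toNat := by
  constructor <;> intro h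
  · exact h
  · exact h

theorem pvACount_countP (perm : List Char) (ch : Char) (c n : Int) :
    pvACount perm ch c n =
      (((PySem.List.pyRange c n 1).countP
        (fun j => (PySem.List.pyGet? perm j).any (fun cj => decide (cj < ch))) : Nat) : Int) := by
  unfold pvACount
  generalize PySem.List.pyRange c n 1 = xs
  suffices h : ∀ (xs : List Int) (k : Int),
      xs.foldl (fun counter j =>
        if (PySem.List.pyGet? perm j).any (fun cj => decide (cj < ch)) then counter + 1
        else counter) k
        = k + ((xs.countP (fun j => (PySem.List.pyGet? perm j).any (fun cj => decide (cj < ch))) : Nat) : Int) by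
    simpa using h xs 0
  intro xs
  induction xs with
  | nil => intro k; simp
  | cons x xs ih =>
    intro k
    simp only [List.foldl_cons, List.countP_cons, ih]
    split <;> simp <;> push_cast <;> ring

theorem pv_countP_range (perm : List Char) (ch : Char) (n : Int) (hn : 0 ≤ n)
    (hlen : n.toNat ≤ perm.length) (d : Nat) :
    ∀ c : Nat, d = n.toNat - c →
      ((PySem.List.pyRange (c : Int) n 1).countP
        (fun j => (PySem.List.pyGet? perm j).any (fun cj => decide (cj < ch)))) =
      ((perm.take n.toNat).drop c).countP (fun w => decide (w < ch)) := by
  induction d with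
  | zero =>
    intro c hd
    have h1 : n ≤ (c : Int) := by omega
    have h2 : (perm.take n.toNat).length ≤ c := by
      simp only [List.length_take]; omega
    rw [PySem.List.pyRange_one_eq_nil h1, List.drop_eq_nil_of_le h2]
    simp
  | succ d ih =>
    intro c hd
    by_cases hc : c < n.toNat
    · have hcn : (c : Int) < n := by omega
      rw [PySem.List.pyRange_one_cons hcn]
      have hcast : (c : Int) + 1 = ((c + 1 : Nat) : Int) := by push_cast; ring
      rw [hcast]
      have hct : c < (perm.take n.toNat).length := by simp only [List.length_take]; omega
      rw [List.drop_eq_getElem_cons hct]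
      rw [List.countP_cons, List.countP_cons, ih (c + 1) (by omega)]
      have hcl : c < perm.length := by omega
      have hg : PySem.List.pyGet? perm ((c : Nat) : Int) = perm[c]? := by simp [pysem]
      have hgt : (perm.take n.toNat)[c] = perm[c] := by
        simp [List.getElem_take]
      simp [hg, List.getElem?_eq_getElem hcl, hgt]
    · have h1 : n ≤ (c : Int) := by omega
      have h2 : (perm.take n.toNat).length ≤ c := by
        simp only [List.length_take]; omega
      rw [PySem.List.pyRange_one_eq_nil h1, List.drop_eq_nil_of_le h2]
      simp

theorem pvA_fold (perm : List Char) (n : Int) (hn : 0 ≤ n) (hlen : n.toNat ≤ perm.length) :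
    ∀ (suf : List Char) (k : Nat) (acc : List Char), suf = perm.drop k → k ≤ perm.length →
      suf.foldl (pvAStep perm n) (((k : Int) + 1), acc) =
        ((perm.length : Int) + 1,
          acc ++ ((List.range' k (perm.length - k)).map (pvDig perm n)).flatten) := by
  intro suf
  induction suf with
  | nil =>
    intro k acc hsuf hk
    have hlk : perm.length ≤ k := by
      rw [← List.drop_eq_nil_iff]; exact hsuf.symm
    have hkl : k = perm.length := le_antisymm hk hlk
    subst hkl
    simp
  | cons ch rest ih =>
    intro k acc hsuf hk
    have hkl : k < perm.length := by
      by_contra hx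
      rw [List.drop_eq_nil_of_le (by omega)] at hsuf
      simp at hsuf
    have hdk := List.drop_eq_getElem_cons hkl (l := perm)
    rw [hdk] at hsuf
    injection hsuf with hch hrest
    rw [List.foldl_cons]
    have hstep : pvAStep perm n (((k : Int) + 1), acc) ch
        = (((k + 1 : Nat) : Int) + 1, acc ++ pvDig perm n k) := by
      unfold pvAStep pvDig
      have hcount : pvACount perm ch ((k : Int) + 1) n
          = ((((perm.take n.toNat).drop (k + 1)).countP
              (fun w => decide (w < perm.getD k ' ')) : Nat) : Int) := by
        rw [pvACount_countP]
        have hcast : (k : Int) + 1 = ((k + 1 : Nat) : Int) := by push_cast; ring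
        rw [hcast, pv_countP_range perm ch n hn hlen (n.toNat - (k + 1)) (k + 1) rfl]
        have : perm.getD k ' ' = perm[k] := List.getD_eq_getElem perm ' ' hkl
        rw [this, ← hch]
      rw [hcount]
      simp
    rw [hstep, ih (k + 1) (acc ++ pvDig perm n k) hrest (by omega)]
    have hr : List.range' k (perm.length - k) = k :: List.range' (k + 1) (perm.length - (k + 1)) := by
      have : perm.length - k = (perm.length - (k + 1)) + 1 := by omega
      rw [this, List.range'_succ]
    rw [hr]
    simp

theorem pvHist_length (ws : List Char) : (pvHist ws).length = 128 := by
  suffices h : ∀ init : List Int,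
      (ws.foldr (fun w cnt => cnt.set w.toNat (cnt.getD w.toNat 0 + 1)) init).length
        = init.length by
    simpa [pvHist] using h (List.replicate 128 0)
  intro init
  induction ws with
  | nil => rfl
  | cons w ws ih => rw [List.foldr_cons, List.length_set]; exact ih

theorem pv_set_take_sum (cnt : List Int) (a code : Nat) (ha : a < cnt.length) :
    ((cnt.set a (cnt.getD a 0 + 1)).take code).sum =
      (cnt.take code).sum + (if a < code then 1 else 0) := by
  induction cnt generalizing a code with
  | nil => simp at ha
  | cons x xs ih =>
    cases a with
    | zero =>
      cases code with
      | zero => simp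
      | succ c => simp [List.take_succ_cons]; ring
    | succ a' =>
      cases code with
      | zero => simp
      | succ c =>
        have ha' : a' < xs.length := by simpa using ha
        simp only [List.getD_cons_succ, List.set_cons_succ, List.take_succ_cons, List.sum_cons]
        rw [ih a' c ha']
        by_cases h : a' < c <;> simp [h] <;> ring

theorem pvHist_take_sum (ws : List Char) (code : Nat) (hcode : code ≤ 128)
    (hws : ∀ w ∈ ws, w.toNat < 128) :
    ((pvHist ws).take code).sum = ((ws.countP (fun w => decide (w.toNat < code)) : Nat) : Int) := by
  induction ws with
  | nil =>
    have h : ∀ k : Nat, ((List.replicate k (0 : Int)).take code).sum = 0 := by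
      intro k
      rw [List.take_replicate]
      simp
    simpa [pvHist] using h 128
  | cons w ws ih =>
    have hw : w.toNat < 128 := hws w (by simp)
    have hrec : ∀ x ∈ ws, x.toNat < 128 := fun x hx => hws x (by simp [hx])
    show (((pvHist ws).set w.toNat ((pvHist ws).getD w.toNat 0 + 1)).take code).sum = _
    rw [pv_set_take_sum (pvHist ws) w.toNat code (by rw [pvHist_length]; exact hw)]
    rw [ih hrec, List.countP_cons]
    by_cases h : w.toNat < code <;> simp [h]

theorem pvB_fold (perm : List Char) (n : Int) (hn : 0 ≤ n) (hlen : n.toNat ≤ perm.length)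
    (hsmall : ∀ w ∈ perm, w.toNat < 128) :
    ∀ m : Nat, m ≤ perm.length →
      ((perm.take m).reverse).foldl (pvBStep n)
          ((m : Int), pvHist ((perm.take n.toNat).drop m),
            ((List.range' m (perm.length - m)).map (pvDig perm n)).reverse) =
        ((0 : Int), pvHist (perm.take n.toNat),
          ((List.range' 0 perm.length).map (pvDig perm n)).reverse) := by
  intro m
  induction m with
  | zero => intro _; simp
  | succ m ih =>
    intro hm
    have hml : m < perm.length := by omega
    have htake : perm.take (m + 1) = perm.take m ++ [perm[m]] := by
      rw [List.take_add_one, List.getElem?_eq_getElem hml]; rfl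
    rw [htake, List.reverse_append, List.reverse_singleton, List.singleton_append,
        List.foldl_cons]
    have hstep : pvBStep n (((m + 1 : Nat) : Int), pvHist ((perm.take n.toNat).drop (m + 1)),
          ((List.range' (m + 1) (perm.length - (m + 1))).map (pvDig perm n)).reverse) perm[m]
        = ((m : Int), pvHist ((perm.take n.toNat).drop m),
          ((List.range' m (perm.length - m)).map (pvDig perm n)).reverse) := by
      unfold pvBStep
      have hwin : ∀ x ∈ (perm.take n.toNat).drop (m + 1), x.toNat < 128 := by
        intro x hx
        exact hsmall x (List.mem_of_mem_take (List.mem_of_mem_drop hx))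
      have hdig : PySem.Int.toChars ((pvHist ((perm.take n.toNat).drop (m + 1))).take perm[m].toNat).sum
          = pvDig perm n m := by
        rw [pvHist_take_sum _ _ (by have := hsmall perm[m] (by simp) ; omega) hwin]
        unfold pvDig
        congr 2
        apply List.countP_congr
        intro x _
        rw [List.getD_eq_getElem perm ' ' hml]
        simp [pv_char_lt]
      have hi : ((m + 1 : Nat) : Int) - 1 = (m : Int) := by push_cast; ring
      have hdigits : (((List.range' (m + 1) (perm.length - (m + 1))).map (pvDig perm n)).reverse
            ++ [pvDig perm n m])
          = ((List.range' m (perm.length - m)).map (pvDig perm n)).reverse := by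
        have hr : List.range' m (perm.length - m)
            = m :: List.range' (m + 1) (perm.length - (m + 1)) := by
          have : perm.length - m = (perm.length - (m + 1)) + 1 := by omega
          rw [this, List.range'_succ]
        rw [hr]; simp
      have hcnt : (if ((m + 1 : Nat) : Int) - 1 < n then
            (pvHist ((perm.take n.toNat).drop (m + 1))).set perm[m].toNat
              ((pvHist ((perm.take n.toNat).drop (m + 1))).getD perm[m].toNat 0 + 1)
          else pvHist ((perm.take n.toNat).drop (m + 1)))
          = pvHist ((perm.take n.toNat).drop m) := by
        rw [hi]
        by_cases hmn : m < n.toNat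
        · have hcond : (m : Int) < n := by omega
          rw [if_pos hcond]
          have hmt : m < (perm.take n.toNat).length := by simp only [List.length_take]; omega
          rw [List.drop_eq_getElem_cons hmt]
          have : (perm.take n.toNat)[m] = perm[m] := by simp [List.getElem_take]
          rw [this]
          rfl
        · have hcond : ¬ ((m : Int) < n) := by omega
          rw [if_neg hcond]
          have h1 : (perm.take n.toNat).drop m = [] := by
            apply List.drop_eq_nil_of_le; simp only [List.length_take]; omega
          have h2 : (perm.take n.toNat).drop (m + 1) = [] := by
            apply List.drop_eq_nil_of_le; simp only [List.length_take]; omega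
          rw [h1, h2]
      rw [hi] at hcnt
      simp only [hi, hdig, hdigits, hcnt]
    rw [hstep, ih (by omega)]

-- ===== VERDICT (by name: the statement is the Claim_ definition above) =====
theorem permutationToFactoradic_spec : Claim_equal_permutationToFactoradic := by
  intro p n hdom hpre
  unfold Spec_permutationToFactoradic permutationToFactoradic permutationToFactoradic_alt
  unfold Pre_permutationToFactoradic at hpre
  by_cases hn : n ≤ 0
  · have hf : ¬ ((1 : Int) ≤ n) := by omega
    have hnt : n.toNat = 0 := by omega
    rw [hnt, if_pos hn]
    show String.ofList (pvAWhile p.toList n 1 (1, [])).2 = ""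
    unfold pvAWhile
    rw [if_neg hf]
  · have hn1 : 0 < n := by omega
    have hlen : n.toNat ≤ p.toList.length := by
      have : p.length = p.toList.length := rfl
      omega
    have hsmall : ∀ w ∈ p.toList, w.toNat < 128 := by
      unfold Dom_permutationToFactoradic pvDomStr pvDomChar at hdom
      simp only [Bool.and_eq_true, List.all_eq_true] at hdom
      intro w hw
      have := hdom.1 w hw
      simp only [Bool.or_eq_true, Bool.and_eq_true, decide_eq_true_eq, beq_iff_eq] at this
      omega
    obtain ⟨t, ht⟩ : ∃ t, n.toNat = t + 1 := ⟨n.toNat - 1, by omega⟩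
    -- A side
    have hA : (pvAWhile p.toList n (n.toNat + 1) (1, [])).2
        = ((List.range' 0 p.toList.length).map (pvDig p.toList n)).flatten := by
      rw [ht]
      show (pvAWhile p.toList n (t + 1 + 1) (1, [])).2 = _
      unfold pvAWhile
      rw [if_pos (by omega : (1 : Int) ≤ n)]
      have hfold := pvA_fold p.toList n (by omega) hlen p.toList 0 [] (by simp) (by omega)
      simp only [Nat.cast_zero, zero_add] at hfold
      rw [hfold]
      unfold pvAWhile
      rw [if_neg (by omega : ¬ ((p.toList.length : Int) + 1 ≤ n))]
      simp
    -- B side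
    have hB0 : pvHist ((p.toList.take n.toNat).drop p.toList.length) = List.replicate 128 0 := by
      rw [List.drop_eq_nil_of_le (by simp only [List.length_take]; omega)]
      rfl
    have hBfold := pvB_fold p.toList n (by omega) hlen hsmall p.toList.length (le_refl _)
    rw [List.take_length] at hBfold
    rw [hB0] at hBfold
    have hD : ((List.range' p.toList.length (p.toList.length - p.toList.length)).map
        (pvDig p.toList n)).reverse = ([] : List (List Char)) := by simp
    rw [hD] at hBfold
    rw [if_neg hn]
    show String.ofList (pvAWhile p.toList n (n.toNat + 1) (1, [])).2
        = String.ofList ((p.toList.reverse.foldl (pvBStep n)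
            ((p.toList.length : Int), List.replicate 128 0, ([] : List (List Char)))).2.2).reverse.flatten
    rw [hA, hBfold]
    simp
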